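-- pv_equiv track=rewrite | github.com/Tanmay53/cohort_3 | submissions/sm_105_ashish/week_14/day_3/new_brick_wall.py | even_rows
-- ===== SOURCE A (Python) =====
-- def even_rows(width):
--     layer = list()
--     for i in range(width):
--         if i == 0:
--             layer.append('|___|')
--         else:
--             layer.append('___|')
--     return "".join(layer)
-- ===== SOURCE B (Python) =====
-- def even_rows(width):
--     if width < 1:
--         return ""
--     return "|" + "___|" * width
-- ===== Notes on version B (the rewrite author's own statement) =====
-- stated objective: simpler
-- what changed: Replaces the per-index loop with its first-iteration special case and the list-append/join accumulator by the closed-form string expression '|' + '___|'*width (empty string for width < 1).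
import Mathlib
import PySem

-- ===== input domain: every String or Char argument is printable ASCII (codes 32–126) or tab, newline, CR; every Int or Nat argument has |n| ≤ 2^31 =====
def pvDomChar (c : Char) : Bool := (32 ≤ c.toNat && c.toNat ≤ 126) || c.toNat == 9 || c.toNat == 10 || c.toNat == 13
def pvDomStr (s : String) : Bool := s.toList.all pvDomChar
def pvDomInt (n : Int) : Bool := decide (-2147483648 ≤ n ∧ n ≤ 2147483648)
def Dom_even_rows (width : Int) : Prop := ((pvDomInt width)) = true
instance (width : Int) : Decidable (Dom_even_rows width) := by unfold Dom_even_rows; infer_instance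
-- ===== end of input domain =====

-- B replaces A's per-index loop (first iteration appends '|___|', the rest '___|') with the
-- closed-form string '|' + '___|'*width ('' for width < 1); objective: simpler.


-- ===== PORT A =====
def even_rows (width : Int) : String :=
  let layer : List String :=
    (PySem.List.pyRange 0 width 1).foldl
      (fun acc i => acc ++ [if i = 0 then "|___|" else "___|"]) []
  PySem.Str.join "" layer

-- ===== PORT B =====
-- '___|' * width ported by hand as PySem.List.pyRepeat on the char list (exact: Python string
-- repetition is list repetition of the code points).
def even_rows_alt (width : Int) : String :=
  if width < 1 then ""
  else "|" ++ String.ofList (PySem.List.pyRepeat "___|".toList width)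

-- ===== PRECONDITION & SPEC =====
def Spec_even_rows (width : Int) (out : String) : Prop := out = even_rows_alt width
instance (width : Int) (out : String) : Decidable (Spec_even_rows width out) := by unfold Spec_even_rows; infer_instance

-- ===== CLAIM (what is proved, stated in full; the proofs are below) =====
def Claim_equal_even_rows : Prop := ∀ (width : Int), Dom_even_rows width → Spec_even_rows width (even_rows width)

-- ===== LEMMAS AND PROOFS =====

-- "".join is concatenation of the pieces' characters.
theorem join_nil_flatten (xs : List (List Char)) : PySem.Chars.join [] xs = xs.flatten := by
  induction xs with
  | nil => rfl
  | cons h t ih => cases t <;> simp_all [PySem.Chars.join, List.intercalate, List.intersperse]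

-- After the first iteration every index is positive, so A appends only '___|'.
theorem tail_replicate {α : Type} (x y : α) (a b : Int) (ha : 0 < a) :
    (PySem.List.pyRange a b 1).map (fun i : Int => if i = 0 then x else y)
      = List.replicate (b - a).toNat y := by
  rw [List.eq_replicate_iff]
  constructor
  · rw [List.length_map, PySem.List.length_pyRange_one]
  · intro s hs
    obtain ⟨i, hi, rfl⟩ := List.mem_map.mp hs
    have := (PySem.List.mem_pyRange_one).mp hi
    rw [if_neg (by omega)]

theorem even_rows_spec_aux (width : Int) : even_rows width = even_rows_alt width := by
  unfold even_rows even_rows_alt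
  by_cases hw : width < 1
  · rw [if_pos hw, PySem.List.pyRange_one_eq_nil (by omega)]
    rfl
  · rw [if_neg hw]
    apply String.toList_inj.mp
    rw [PySem.List.foldl_append_singleton_eq_map, List.nil_append,
      PySem.List.pyRange_one_cons (by omega), List.map_cons, if_pos rfl,
      tail_replicate "|___|" "___|" (0 + 1) width (by omega)]
    simp only [PySem.Str.toList_join, List.map_cons, List.map_replicate]
    rw [show ("" : String).toList = [] from rfl, join_nil_flatten, List.flatten_cons,
      String.toList_append]
    have hwn : width.toNat = (width - (0 + 1)).toNat + 1 := by omega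
    simp only [PySem.List.pyRepeat, String.toList_ofList, hwn, List.replicate_succ,
      List.flatten_cons]
    rw [show ("|___|" : String).toList = ("|" : String).toList ++ ("___|" : String).toList from rfl,
      List.append_assoc]

-- ===== VERDICT (by name: the statement is the Claim_ definition above) =====
theorem even_rows_spec : Claim_equal_even_rows := by
  intro width _
  unfold Spec_even_rows
  exact even_rows_spec_aux width
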